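-- pv_equiv track=rewrite | github.com/tasogarexerion/taso-swindle | taso_swindle/usi_protocol.py | _parse_go_time_info
-- ===== SOURCE A (Python) =====
-- from typing import Optional
--
-- def _parse_go_time_info(go_line: str) -> dict[str, Optional[int]]:
--     tokens = go_line.split()
--     fields = {
--         "btime": None,
--         "wtime": None,
--         "byoyomi": None,
--         "binc": None,
--         "winc": None,
--         "movetime": None,
--         "movestogo": None,
--     }
--
--     for key in list(fields.keys()):
--         if key in tokens:
--             i = tokens.index(key)
--             if i + 1 < len(tokens):
--                 try:
--                     fields[key] = int(tokens[i + 1])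
--                 except Exception:
--                     fields[key] = None
--     return fields
-- ===== SOURCE B (Python) =====
-- from typing import Optional
--
-- _KEYS = ("btime", "wtime", "byoyomi", "binc", "winc", "movetime", "movestogo")
--
-- def _parse_go_time_info(go_line: str) -> dict[str, Optional[int]]:
--     # single-pass state machine: 'pending' holds a key awaiting its value token
--     fields: dict[str, Optional[int]] = {k: None for k in _KEYS}
--     seen: set[str] = set()
--     pending: Optional[str] = None
--     for t in go_line.split():
--         if pending is not None:
--             try:
--                 fields[pending] = int(t)
--             except ValueError:
--                 fields[pending] = None
--             pending = None
--         if t in fields and t not in seen: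
--             seen.add(t)
--             pending = t
--     return fields
-- ===== Notes on version B (the rewrite author's own statement) =====
-- stated objective: alternative
-- what changed: Replaces A's seven per-key membership/.index scans over the token list by a single-pass state machine: one loop over the tokens with a 'pending key awaiting its value' register and a seen-set, assigning a field the moment its value token arrives.
import Mathlib
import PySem

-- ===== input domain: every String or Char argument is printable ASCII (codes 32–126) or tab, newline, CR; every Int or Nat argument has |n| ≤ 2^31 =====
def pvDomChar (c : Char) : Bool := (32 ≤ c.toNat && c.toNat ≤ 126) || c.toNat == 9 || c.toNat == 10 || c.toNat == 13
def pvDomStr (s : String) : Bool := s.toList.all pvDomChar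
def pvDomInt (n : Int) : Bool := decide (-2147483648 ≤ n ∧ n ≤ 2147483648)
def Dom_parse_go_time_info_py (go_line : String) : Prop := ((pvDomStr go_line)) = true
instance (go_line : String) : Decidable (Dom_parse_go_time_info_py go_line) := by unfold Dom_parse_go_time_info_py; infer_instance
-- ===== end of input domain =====

-- B replaces A's seven per-key 'in'/'.index' scans by a single-pass state machine over the tokens
-- (a 'pending key awaiting its value' register plus a seen-set); objective: alternative.

-- ===== PORT A =====
-- loop body of A's 'for key in list(fields.keys())'.
-- 'tokens.getD (i + 1) ""' ports 'tokens[i + 1]'; it is exact because it is only reached under the guard i + 1 < tokens.length.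
def pvStepA (tokens : List String) (fields : PySem.Dict String (Option Int)) (key : String) : PySem.Dict String (Option Int) :=
  if key ∈ tokens then
    match PySem.List.index? tokens key with
    | some i =>
      if i + 1 < tokens.length then
        fields.insert key (PySem.Int.ofStr? (tokens.getD (i + 1) ""))
      else fields
    | none => fields
  else fields

def parse_go_time_info_py (go_line : String) : List (String × Option Int) :=
  let tokens := PySem.Str.split₀ go_line
  let fields : PySem.Dict String (Option Int) :=
    PySem.Dict.ofList [("btime", none), ("wtime", none), ("byoyomi", none), ("binc", none),
      ("winc", none), ("movetime", none), ("movestogo", none)]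
  ((PySem.Dict.keys fields).foldl (pvStepA tokens) fields).items

-- ===== PORT B =====
def pvKeysB : List String := ["btime", "wtime", "byoyomi", "binc", "winc", "movetime", "movestogo"]

-- loop body of B's single pass: first hand the token to the pending key (try int(t) / except → None),
-- then, if the token is an unseen key, mark it seen and make it pending.
def pvStepB (st : PySem.Dict String (Option Int) × PySem.Set String × Option String) (t : String) :
    PySem.Dict String (Option Int) × PySem.Set String × Option String :=
  let st1 : PySem.Dict String (Option Int) × PySem.Set String :=
    match st.2.2 with
    | some p => (st.1.insert p (PySem.Int.ofStr? t), st.2.1)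
    | none => (st.1, st.2.1)
  if st1.1.contains t && !(PySem.Set.contains st1.2 t) then
    (st1.1, PySem.Set.add st1.2 t, some t)
  else (st1.1, st1.2, none)

def parse_go_time_info_py_alt (go_line : String) : List (String × Option Int) :=
  let fields : PySem.Dict String (Option Int) :=
    PySem.Dict.ofList (pvKeysB.map (fun k => (k, none)))
  ((PySem.Str.split₀ go_line).foldl pvStepB (fields, PySem.Set.empty, none)).1.items

-- ===== PRECONDITION & SPEC =====
def Spec_parse_go_time_info_py (go_line : String) (out : List (String × Option Int)) : Prop := out = parse_go_time_info_py_alt go_line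
instance (go_line : String) (out : List (String × Option Int)) : Decidable (Spec_parse_go_time_info_py go_line out) := by unfold Spec_parse_go_time_info_py; infer_instance

-- ===== CLAIM (what is proved, stated in full; the proofs are below) =====
def Claim_equal_parse_go_time_info_py : Prop := ∀ (go_line : String), Dom_parse_go_time_info_py go_line → Spec_parse_go_time_info_py go_line (parse_go_time_info_py go_line)

-- ===== LEMMAS AND PROOFS =====

-- value both programs end up storing for key k: parse the token after k's first occurrence, if any
def pvVal (toks : List String) (k : String) : Option Int :=
  match PySem.List.index? toks k with
  | none => none
  | some i =>
    match toks[i + 1]? with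
    | none => none
    | some s => PySem.Int.ofStr? s

lemma pv_insert_same (d : PySem.Dict String (Option Int)) (k : String) (v : Option Int)
    (hnd : d.keys.Nodup) (h : d.get? k = some v) : d.insert k v = d := by
  apply PySem.Dict.ext
  have hc : d.contains k = true := by
    rw [PySem.Dict.contains_eq_isSome_get?, h]; rfl
  rw [PySem.Dict.items_insert_of_contains d v hc]
  conv_rhs => rw [← List.map_id d.items]
  apply List.map_congr_left
  intro p hp
  by_cases hpk : p.1 = k
  · obtain ⟨p1, p2⟩ := p
    simp only at hpk
    subst hpk
    have hg : d.get? p1 = some p2 := PySem.Dict.get?_of_mem_items d hp hnd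
    rw [h] at hg
    simp [Option.some_inj.mp hg]
  · simp [hpk]

lemma pv_stepA (toks : List String) (d : PySem.Dict String (Option Int)) (k : String)
    (hnd : d.keys.Nodup) (h : d.get? k = some none) :
    pvStepA toks d k = d.insert k (pvVal toks k) := by
  by_cases hk : k ∈ toks
  · obtain ⟨i, hi⟩ := Option.isSome_iff_exists.mp ((PySem.List.index?_isSome_iff toks k).mpr hk)
    by_cases hlen : i + 1 < toks.length
    · have hget : toks[i + 1]? = some (toks[i + 1]'hlen) := List.getElem?_eq_getElem hlen
      have hgetD : toks.getD (i + 1) "" = toks[i + 1]'hlen := by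
        rw [List.getD_eq_getElem?_getD, hget]; rfl
      simp only [pvStepA, pvVal, hi, if_pos hk, if_pos hlen, hget, hgetD]
    · have hget : toks[i + 1]? = none := by
        rw [List.getElem?_eq_none]; omega
      simp only [pvStepA, if_pos hk, hi, if_neg hlen, pvVal, hget]
      exact (pv_insert_same d k none hnd h).symm
  · have hnone : PySem.List.index? toks k = none := (PySem.List.index?_eq_none_iff toks k).mpr hk
    simp only [pvStepA, if_neg hk, pvVal, hnone]
    exact (pv_insert_same d k none hnd h).symm

lemma pv_foldA (toks : List String) : ∀ (ks : List String) (d : PySem.Dict String (Option Int)),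
    d.keys.Nodup → ks.Nodup → (∀ k ∈ ks, d.get? k = some none) →
    ks.foldl (pvStepA toks) d = ks.foldl (fun d k => d.insert k (pvVal toks k)) d := by
  intro ks
  induction ks with
  | nil => intros; rfl
  | cons a tl ih =>
    intro d hnd hks hall
    simp only [List.foldl_cons]
    rw [pv_stepA toks d a hnd (hall a (by simp))]
    refine ih _ (PySem.Dict.nodup_keys_insert d a _ hnd) hks.of_cons ?_
    intro k hk
    rw [PySem.Dict.get?_insert_of_ne d _ (fun e => (List.nodup_cons.mp hks).1 (by rw [← e]; exact hk))]
    exact hall k (by simp [hk])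

lemma pv_get?_fold_notmem (f : String → Option Int) :
    ∀ (ks : List String) (d : PySem.Dict String (Option Int)) (k : String), k ∉ ks →
    (ks.foldl (fun d k => d.insert k (f k)) d).get? k = d.get? k := by
  intro ks
  induction ks with
  | nil => intros; rfl
  | cons a tl ih =>
    intro d k hk
    simp only [List.foldl_cons]
    rw [ih _ k (fun h => hk (by simp [h])),
        PySem.Dict.get?_insert_of_ne d _ (fun e => hk (by simp [e]))]

lemma pv_getD_fold (f : String → Option Int) :
    ∀ (ks : List String) (d : PySem.Dict String (Option Int)) (k : String), ks.Nodup → k ∈ ks →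
    (ks.foldl (fun d k => d.insert k (f k)) d).getD k none = f k := by
  intro ks
  induction ks with
  | nil => intro d k _ hk; exact absurd hk (List.not_mem_nil)
  | cons a tl ih =>
    intro d k hnd hk
    simp only [List.foldl_cons]
    by_cases hka : k = a
    · subst hka
      rw [PySem.Dict.getD_eq_get?_getD,
          pv_get?_fold_notmem f tl _ k (List.nodup_cons.mp hnd).1,
          PySem.Dict.get?_insert_self]
      rfl
    · exact ih _ k (List.nodup_cons.mp hnd).2 (by rcases List.mem_cons.mp hk with h | h; exact absurd h hka; exact h)

lemma pv_A_items (go_line : String) :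
    parse_go_time_info_py go_line
      = pvKeysB.map (fun k => (k, pvVal (PySem.Str.split₀ go_line) k)) := by
  simp only [parse_go_time_info_py]
  rw [show (PySem.Dict.keys (PySem.Dict.ofList
        [("btime", (none : Option Int)), ("wtime", none), ("byoyomi", none), ("binc", none),
         ("winc", none), ("movetime", none), ("movestogo", none)])) = pvKeysB from by decide]
  rw [pv_foldA (PySem.Str.split₀ go_line) pvKeysB _ (by decide) (by decide) (by decide)]
  have hnd := PySem.Dict.nodup_keys_foldl_insert pvKeysB
      (fun _ k => pvVal (PySem.Str.split₀ go_line) k)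
      (PySem.Dict.ofList
        [("btime", (none : Option Int)), ("wtime", none), ("byoyomi", none), ("binc", none),
         ("winc", none), ("movetime", none), ("movestogo", none)]) (by decide)
  rw [PySem.Dict.items_eq_map_keys _ hnd none,
      PySem.Dict.keys_foldl_insert pvKeysB (fun _ k => pvVal (PySem.Str.split₀ go_line) k) _,
      show PySem.Set.update (PySem.Dict.keys (PySem.Dict.ofList
        [("btime", (none : Option Int)), ("wtime", none), ("byoyomi", none), ("binc", none),
         ("winc", none), ("movetime", none), ("movestogo", none)])) pvKeysB = pvKeysB from by decide]
  apply List.map_congr_left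
  intro k hkmem
  rw [pv_getD_fold (fun k => pvVal (PySem.Str.split₀ go_line) k) pvKeysB _ k (by decide) hkmem]

-- ===== B-side lemmas =====

-- what the scan will have stored for k after consuming toks, given default g
def pvScanVal (toks : List String) (k : String) (g : Option (Option Int)) : Option (Option Int) :=
  match PySem.List.index? toks k with
  | none => g
  | some i =>
    match toks[i + 1]? with
    | none => g
    | some s => some (PySem.Int.ofStr? s)

def pvRhsN (toks : List String) (k : String) (S : PySem.Set String) (g : Option (Option Int)) :
    Option (Option Int) :=
  if k ∈ S ∨ k ∉ pvKeysB then g else pvScanVal toks k g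

lemma pvScanVal_nil (k : String) (g : Option (Option Int)) : pvScanVal [] k g = g := rfl

lemma pvScanVal_cons_ne (t k : String) (rest : List String) (g : Option (Option Int))
    (htk : t ≠ k) : pvScanVal (t :: rest) k g = pvScanVal rest k g := by
  simp only [pvScanVal, PySem.List.index?_cons_of_ne rest htk]
  cases PySem.List.index? rest k with
  | none => rfl
  | some j => simp

lemma pv_scan_keys : ∀ (toks : List String) (fields : PySem.Dict String (Option Int))
    (S : PySem.Set String) (prev : Option String),
    fields.keys = pvKeysB → (∀ p, prev = some p → p ∈ pvKeysB) →
    ((toks.foldl pvStepB (fields, S, prev)).1).keys = pvKeysB := by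
  intro toks
  induction toks with
  | nil => intro fields S prev hkeys _; exact hkeys
  | cons t rest ih =>
    intro fields S prev hkeys hprev
    simp only [List.foldl_cons]
    -- the state after one step
    have hstep : ∀ (f2 : PySem.Dict String (Option Int)), f2.keys = pvKeysB →
        ((rest.foldl pvStepB
          (if f2.contains t && !(PySem.Set.contains S t) then (f2, PySem.Set.add S t, some t)
           else (f2, S, none))).1).keys = pvKeysB := by
      intro f2 hk2
      by_cases hc : (f2.contains t && !(PySem.Set.contains S t)) = true
      · rw [if_pos hc]
        refine ih f2 (PySem.Set.add S t) (some t) hk2 ?_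
        intro p hp
        cases hp
        have h1 : f2.contains t = true := by
          cases hcc : f2.contains t with
          | true => rfl
          | false => rw [hcc] at hc; simp at hc
        have := (PySem.Dict.contains_iff_mem_keys f2 t).mp h1
        rwa [hk2] at this
      · rw [if_neg hc]
        exact ih f2 S none hk2 (by intro p hp; cases hp)
    cases hpv : prev with
    | none => simpa only [pvStepB] using hstep fields hkeys
    | some p =>
      have hpK : p ∈ pvKeysB := hprev p hpv
      have hcp : fields.contains p = true :=
        (PySem.Dict.contains_iff_mem_keys fields p).mpr (by rw [hkeys]; exact hpK)
      have hk2 : (fields.insert p (PySem.Int.ofStr? t)).keys = pvKeysB := by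
        rw [PySem.Dict.keys_insert_of_contains fields _ hcp]; exact hkeys
      simpa only [pvStepB] using hstep (fields.insert p (PySem.Int.ofStr? t)) hk2

lemma pv_scan_get : ∀ (toks : List String) (fields : PySem.Dict String (Option Int))
    (S : PySem.Set String) (prev : Option String) (k : String),
    fields.keys = pvKeysB → (∀ p, prev = some p → p ∈ S ∧ p ∈ pvKeysB) →
    ((toks.foldl pvStepB (fields, S, prev)).1).get? k =
      (match prev with
       | some p =>
         if p = k then
           (match toks.head? with
            | none => fields.get? k
            | some t => some (PySem.Int.ofStr? t))
         else pvRhsN toks k S (fields.get? k)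
       | none => pvRhsN toks k S (fields.get? k)) := by
  intro toks
  induction toks with
  | nil =>
    intro fields S prev k hkeys hprev
    cases prev with
    | none => simp [pvRhsN, pvScanVal_nil]
    | some p =>
      by_cases hpk : p = k
      · simp [hpk]
      · simp [hpk, pvRhsN, pvScanVal_nil]
  | cons t rest ih =>
    intro fields S prev k hkeys hprev
    simp only [List.foldl_cons]
    -- the generic "no pending relevant to k" step
    have hmain : ∀ (f2 : PySem.Dict String (Option Int)), f2.keys = pvKeysB →
        f2.get? k = fields.get? k →
        ((rest.foldl pvStepB
          (if f2.contains t && !(PySem.Set.contains S t) then (f2, PySem.Set.add S t, some t)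
           else (f2, S, none))).1).get? k = pvRhsN (t :: rest) k S (fields.get? k) := by
      intro f2 hk2 hg2
      by_cases hmem : t ∈ pvKeysB ∧ t ∉ S
      · have hcond : (f2.contains t && !(PySem.Set.contains S t)) = true := by
          simp [PySem.Dict.contains_eq_decide_mem_keys, hk2, hmem.1, PySem.Set.contains, hmem.2]
        rw [if_pos hcond,
            ih f2 (PySem.Set.add S t) (some t) k hk2
              (by intro p hp; cases hp;
                  exact ⟨(PySem.Set.mem_add S t t).mpr (Or.inr rfl), hmem.1⟩)]
        dsimp only
        by_cases htk : t = k
        · subst htk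
          rw [if_pos rfl]
          have hknS : ¬(t ∈ S ∨ t ∉ pvKeysB) := by
            push_neg; exact ⟨hmem.2, hmem.1⟩
          simp only [pvRhsN, if_neg hknS, pvScanVal, PySem.List.index?_cons_self]
          cases rest with
          | nil => simp [hg2]
          | cons u us => simp
        · rw [if_neg htk]
          simp only [pvRhsN, hg2]
          by_cases hkS : k ∈ S ∨ k ∉ pvKeysB
          · rw [if_pos hkS, if_pos (by
              rcases hkS with h | h
              · exact Or.inl ((PySem.Set.mem_add S t k).mpr (Or.inl h))
              · exact Or.inr h)]
          · have hkS' : ¬(k ∈ PySem.Set.add S t ∨ k ∉ pvKeysB) := by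
              push_neg at hkS ⊢
              exact ⟨by
                intro hmem'
                rcases (PySem.Set.mem_add S t k).mp hmem' with h | h
                · exact hkS.1 h
                · exact htk h.symm, hkS.2⟩
            rw [if_neg hkS, if_neg hkS', pvScanVal_cons_ne t k rest _ htk]
      · have hcond : (f2.contains t && !(PySem.Set.contains S t)) = false := by
          by_cases htK : t ∈ pvKeysB
          · have htS : t ∈ S := by
              by_contra h; exact hmem ⟨htK, h⟩
            have hSc : PySem.Set.contains S t = true := by
              simp [PySem.Set.contains, List.contains_eq_mem, htS]
            rw [hSc]; simp
          · simp [PySem.Dict.contains_eq_decide_mem_keys, hk2, htK]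
        rw [if_neg (by rw [hcond]; simp),
            ih f2 S none k hk2 (by intro p hp; cases hp)]
        dsimp only
        simp only [pvRhsN, hg2]
        by_cases hkS : k ∈ S ∨ k ∉ pvKeysB
        · rw [if_pos hkS, if_pos hkS]
        · have htk : t ≠ k := by
            intro e; subst e
            push_neg at hkS
            exact hmem ⟨hkS.2, hkS.1⟩
          rw [if_neg hkS, if_neg hkS, pvScanVal_cons_ne t k rest _ htk]
    cases prev with
    | none =>
      simpa only [pvStepB] using hmain fields hkeys rfl
    | some p =>
      obtain ⟨hpS, hpK⟩ := hprev p rfl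
      have hcp : fields.contains p = true :=
        (PySem.Dict.contains_iff_mem_keys fields p).mpr (by rw [hkeys]; exact hpK)
      have hk2 : (fields.insert p (PySem.Int.ofStr? t)).keys = pvKeysB := by
        rw [PySem.Dict.keys_insert_of_contains fields _ hcp]; exact hkeys
      by_cases hpk : p = k
      · subst hpk
        dsimp only
        rw [if_pos rfl]
        have hget2 : (fields.insert p (PySem.Int.ofStr? t)).get? p =
            some (PySem.Int.ofStr? t) := by rw [PySem.Dict.get?_insert_self]
        by_cases hc : ((fields.insert p (PySem.Int.ofStr? t)).contains t
            && !(PySem.Set.contains S t)) = true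
        · have h2 : PySem.Set.contains S t = false := by
            cases hcc : PySem.Set.contains S t with
            | false => rfl
            | true => rw [hcc] at hc; simp at hc
          have htS : t ∉ S := by
            simpa [PySem.Set.contains, List.contains_eq_mem] using h2
          have htp : t ≠ p := fun e => htS (e ▸ hpS)
          have h1 : (fields.insert p (PySem.Int.ofStr? t)).contains t = true := by
            cases hcc : (fields.insert p (PySem.Int.ofStr? t)).contains t with
            | true => rfl
            | false => rw [hcc] at hc; simp at hc
          have htK : t ∈ pvKeysB := by
            have := (PySem.Dict.contains_iff_mem_keys _ t).mp h1
            rwa [hk2] at this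
          simp only [pvStepB, if_pos hc]
          rw [ih (fields.insert p (PySem.Int.ofStr? t)) (PySem.Set.add S t) (some t) p hk2
              (by intro q hq; cases hq;
                  exact ⟨(PySem.Set.mem_add S t t).mpr (Or.inr rfl), htK⟩)]
          dsimp only
          rw [if_neg htp]
          have hpmem : p ∈ PySem.Set.add S t := (PySem.Set.mem_add S t p).mpr (Or.inl hpS)
          simp [pvRhsN, hpmem, hget2]
        · simp only [pvStepB, if_neg hc]
          rw [ih (fields.insert p (PySem.Int.ofStr? t)) S none p hk2
              (by intro q hq; cases hq)]
          dsimp only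
          simp [pvRhsN, hpS, hget2]
      · dsimp only
        rw [if_neg hpk]
        have hg2 : (fields.insert p (PySem.Int.ofStr? t)).get? k = fields.get? k :=
          PySem.Dict.get?_insert_of_ne fields _ (fun e => hpk e.symm)
        simpa only [pvStepB] using hmain (fields.insert p (PySem.Int.ofStr? t)) hk2 hg2

lemma pv_scanVal_getD (toks : List String) (k : String) :
    (pvScanVal toks k (some none)).getD none = pvVal toks k := by
  unfold pvScanVal pvVal
  cases PySem.List.index? toks k with
  | none => rfl
  | some i =>
    dsimp only
    cases toks[i + 1]? with
    | none => rfl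
    | some s => rfl

lemma pv_B_items (go_line : String) :
    parse_go_time_info_py_alt go_line
      = pvKeysB.map (fun k => (k, pvVal (PySem.Str.split₀ go_line) k)) := by
  simp only [parse_go_time_info_py_alt]
  have hk0 : (PySem.Dict.ofList (pvKeysB.map (fun k => (k, (none : Option Int))))).keys
      = pvKeysB := by decide
  have hkeys := pv_scan_keys (PySem.Str.split₀ go_line) _ PySem.Set.empty none hk0
    (by intro p hp; cases hp)
  rw [PySem.Dict.items_eq_map_keys _ (by rw [hkeys]; decide) none, hkeys]
  apply List.map_congr_left
  intro k hkmem
  rw [PySem.Dict.getD_eq_get?_getD,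
      pv_scan_get (PySem.Str.split₀ go_line) _ PySem.Set.empty none k hk0
        (by intro p hp; cases hp)]
  have hg : (PySem.Dict.ofList (pvKeysB.map (fun k => (k, (none : Option Int))))).get? k
      = some none := by fin_cases hkmem <;> rfl
  have hknS : ¬(k ∈ PySem.Set.empty ∨ k ∉ pvKeysB) := by
    push_neg; exact ⟨by simp [PySem.Set.empty], hkmem⟩
  simp only [pvRhsN, if_neg hknS, hg]
  rw [pv_scanVal_getD]

-- ===== VERDICT (by name: the statement is the Claim_ definition above) =====
theorem parse_go_time_info_py_spec : Claim_equal_parse_go_time_info_py := by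
  intro go_line _
  unfold Spec_parse_go_time_info_py
  rw [pv_A_items, pv_B_items]
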